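-- pv_equiv track=rewrite | github.com/pfpalmer/testhouse | dog.py | unique_abbrev
-- ===== SOURCE A (Python) =====
-- def unique_abbrev(abbs, words):
--     words_dict = {}
--     for word in words:
--         words_dict[word] = 0
--
--     for k in words_dict:
--         for ab in abbs:
--             if k.startswith(ab):
--                 words_dict[k] = words_dict[k] + 1
--
--     for k in words_dict:
--         if words_dict[k] > 1 :
--             return False
--     return True
-- ===== SOURCE B (Python) =====
-- def unique_abbrev(abbs, words):
--     # Count each abbreviation once (with multiplicity), then walk each word's
--     # prefixes with O(1) lookups, bailing out as soon as two hits are seen.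
--     cnt = {}
--     for ab in abbs:
--         cnt[ab] = cnt.get(ab, 0) + 1
--     for w in words:
--         hits = 0
--         for i in range(len(w) + 1):
--             hits += cnt.get(w[:i], 0)
--             if hits > 1:
--                 return False
--     return True
-- ===== Notes on version B (the rewrite author's own statement) =====
-- stated objective: faster
-- what changed: A counts, for every distinct word, matching abbreviations by scanning the whole abbreviation list per word; B builds a count dict of the abbreviations once and walks each word's prefixes with O(1) lookups, returning False as soon as a second hit is seen.
import Mathlib
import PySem

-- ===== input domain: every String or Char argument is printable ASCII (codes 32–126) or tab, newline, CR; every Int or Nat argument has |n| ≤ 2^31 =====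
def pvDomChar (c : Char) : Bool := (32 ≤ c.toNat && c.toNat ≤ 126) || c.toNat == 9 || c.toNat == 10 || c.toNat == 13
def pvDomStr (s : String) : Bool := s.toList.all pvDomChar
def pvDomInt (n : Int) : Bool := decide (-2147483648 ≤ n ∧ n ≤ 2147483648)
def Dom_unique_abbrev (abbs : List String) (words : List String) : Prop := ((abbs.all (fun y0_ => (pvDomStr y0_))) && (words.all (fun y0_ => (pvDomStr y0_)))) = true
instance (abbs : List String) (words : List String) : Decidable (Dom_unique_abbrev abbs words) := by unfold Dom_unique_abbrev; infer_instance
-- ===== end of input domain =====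

-- B replaces A's per-word scan over all abbreviations by a counting dict of the
-- abbreviations looked up once per word prefix, with an early exit at two hits.

-- ===== PORT A =====
def unique_abbrev (abbs : List String) (words : List String) : Bool :=
  -- words_dict = {}; for word in words: words_dict[word] = 0
  let d0 : PySem.Dict String Int :=
    words.foldl (fun d word => d.insert word 0) PySem.Dict.empty
  -- for k in words_dict: for ab in abbs: if k.startswith(ab): words_dict[k] += 1
  -- (only values change, so iterating the phase-1 key list is the dict iteration)
  let d1 : PySem.Dict String Int :=
    d0.keys.foldl (fun d k =>
      abbs.foldl (fun d ab =>
        if PySem.Str.startswith k ab then d.insert k (d.getD k 0 + 1) else d) d) d0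
  -- for k in words_dict: if words_dict[k] > 1: return False   /   return True
  -- (k is always a key, so the strict lookup words_dict[k] is getD with unused default)
  if d1.keys.any (fun k => decide (d1.getD k 0 > 1)) then false else true

-- ===== PORT B =====
-- inner loop of Source B: for i in range(len(w)+1): hits += cnt.get(w[:i], 0); if hits > 1: return False
-- (w[:i] with 0 ≤ i ≤ len(w) is exactly String.ofList (w.toList.take i))
def uaWordLoop (cnt : PySem.Dict String Int) (w : List Char) : List Nat → Int → Bool
  | [], _ => true
  | i :: rest, hits =>
    let hits' := hits + cnt.getD (String.ofList (w.take i)) 0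
    if hits' > 1 then false else uaWordLoop cnt w rest hits'

def unique_abbrev_alt (abbs : List String) (words : List String) : Bool :=
  -- cnt = {}; for ab in abbs: cnt[ab] = cnt.get(ab, 0) + 1
  let cnt : PySem.Dict String Int :=
    abbs.foldl (fun d ab => d.insert ab (d.getD ab 0 + 1)) PySem.Dict.empty
  -- for w in words: <prefix scan with early return False>; return True  (len(w) = w.toList.length)
  words.all (fun w => uaWordLoop cnt w.toList (List.range (w.toList.length + 1)) 0)

-- ===== PRECONDITION & SPEC =====
def Spec_unique_abbrev (abbs : List String) (words : List String) (out : Bool) : Prop := out = unique_abbrev_alt abbs words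
instance (abbs : List String) (words : List String) (out : Bool) : Decidable (Spec_unique_abbrev abbs words out) := by unfold Spec_unique_abbrev; infer_instance

-- ===== CLAIM (what is proved, stated in full; the proofs are below) =====
def Claim_equal_unique_abbrev : Prop := ∀ (abbs : List String) (words : List String), Dom_unique_abbrev abbs words → Spec_unique_abbrev abbs words (unique_abbrev abbs words)

-- ===== LEMMAS AND PROOFS =====

-- number of abbreviations (with multiplicity) that are a prefix of w
def uaCnt (abbs : List String) (w : String) : Nat :=
  abbs.countP (fun ab => PySem.Str.startswith w ab)

-- phase 1 of A: every value is 0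
lemma ua_d0_getD (l : List String) (d : PySem.Dict String Int) (k : String)
    (h : d.getD k 0 = 0) :
    (l.foldl (fun d w => d.insert w 0) d).getD k 0 = 0 := by
  induction l generalizing d with
  | nil => exact h
  | cons a l ih =>
      refine ih _ ?_
      rw [PySem.Dict.getD_insert]
      split <;> simp [h]

-- inner loop of A's phase 2 at key k
lemma ua_inner_getD (abbs : List String) (k k' : String) (d : PySem.Dict String Int) :
    (abbs.foldl (fun d ab =>
        if PySem.Str.startswith k ab then d.insert k (d.getD k 0 + 1) else d) d).getD k' 0
      = if k' = k then d.getD k 0 + (uaCnt abbs k : Int) else d.getD k' 0 := by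
  induction abbs generalizing d with
  | nil => simp [uaCnt]; intro h; rw [h]
  | cons a abbs ih =>
      simp only [List.foldl_cons]
      have hcnt : (uaCnt (a :: abbs) k : Int) =
          (uaCnt abbs k : Int) + (if PySem.Str.startswith k a = true then 1 else 0) := by
        simp only [uaCnt, List.countP_cons]
        split <;> push_cast <;> ring
      by_cases hs : PySem.Str.startswith k a = true
      · rw [if_pos hs, ih]
        by_cases he : k' = k
        · subst he
          rw [if_pos rfl, if_pos rfl, PySem.Dict.getD_insert, if_pos rfl, hcnt, if_pos hs]
          ring
        · rw [if_neg he, if_neg he, PySem.Dict.getD_insert, if_neg he]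
      · rw [if_neg hs, ih, hcnt, if_neg hs]
        by_cases he : k' = k <;> simp [he]

lemma ua_inner_keys (abbs : List String) (k : String) (d : PySem.Dict String Int)
    (h : d.contains k = true) :
    (abbs.foldl (fun d ab =>
        if PySem.Str.startswith k ab then d.insert k (d.getD k 0 + 1) else d) d).keys = d.keys := by
  induction abbs generalizing d with
  | nil => rfl
  | cons a abbs ih =>
      simp only [List.foldl_cons]
      split
      · rw [ih _ (PySem.Dict.contains_insert_self d k _),
            PySem.Dict.keys_insert_of_contains d _ h]
      · exact ih _ h

-- phase 2 of A over a nodup key list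
lemma ua_phase2 (abbs : List String) (l : List String) (hl : l.Nodup)
    (d : PySem.Dict String Int) (hc : ∀ k ∈ l, d.contains k = true) :
    (l.foldl (fun d k => abbs.foldl (fun d ab =>
        if PySem.Str.startswith k ab then d.insert k (d.getD k 0 + 1) else d) d) d).keys = d.keys ∧
    ∀ k', (l.foldl (fun d k => abbs.foldl (fun d ab =>
        if PySem.Str.startswith k ab then d.insert k (d.getD k 0 + 1) else d) d) d).getD k' 0
      = d.getD k' 0 + (if k' ∈ l then (uaCnt abbs k' : Int) else 0) := by
  induction l generalizing d with
  | nil => simp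
  | cons a l ih =>
      have hca : d.contains a = true := hc a (by simp)
      have hstep_keys := ua_inner_keys abbs a d hca
      have hc' : ∀ k ∈ l, (abbs.foldl (fun d ab =>
          if PySem.Str.startswith a ab then d.insert a (d.getD a 0 + 1) else d) d).contains k = true := by
        intro k hk
        have hm := hc k (by simp [hk])
        rw [PySem.Dict.contains_iff_mem_keys] at hm ⊢
        rw [hstep_keys]; exact hm
      have hanotin : a ∉ l := (List.nodup_cons.mp hl).1
      obtain ⟨ihk, ihv⟩ := ih hl.of_cons _ hc'
      constructor
      · simp only [List.foldl_cons]; rw [ihk, hstep_keys]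
      · intro k'
        simp only [List.foldl_cons]
        rw [ihv k', ua_inner_getD abbs a k' d]
        by_cases hek : k' = a
        · subst hek; simp [hanotin]
        · simp [hek]

-- A = "every distinct word has at most one matching abbreviation"
lemma ua_A_eq (abbs words : List String) :
    unique_abbrev abbs words
      = (PySem.List.dedup words).all (fun w => decide ((uaCnt abbs w : Int) ≤ 1)) := by
  unfold unique_abbrev
  simp only []
  set d0 : PySem.Dict String Int :=
    words.foldl (fun d word => d.insert word 0) PySem.Dict.empty with hd0
  have hkeys0 : d0.keys = PySem.List.dedup words := by
    rw [hd0, PySem.Dict.keys_foldl_insert, PySem.Dict.keys_empty,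
        PySem.Set.update_nil_left, PySem.List.dedup_eq_ofList]
  have hnd0 : d0.keys.Nodup := by
    rw [hkeys0]; exact PySem.List.nodup_dedup words
  have hv0 : ∀ k, d0.getD k 0 = 0 := fun k =>
    ua_d0_getD words PySem.Dict.empty k (PySem.Dict.getD_empty k 0)
  have hc0 : ∀ k ∈ d0.keys, d0.contains k = true := by
    intro k hk; exact (PySem.Dict.contains_iff_mem_keys d0 k).mpr hk
  obtain ⟨hk1, hv1⟩ := ua_phase2 abbs d0.keys hnd0 d0 hc0
  set d1 : PySem.Dict String Int :=
    d0.keys.foldl (fun d k => abbs.foldl (fun d ab =>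
      if PySem.Str.startswith k ab then d.insert k (d.getD k 0 + 1) else d) d) d0 with hd1
  have hval : ∀ k ∈ d0.keys, d1.getD k 0 = (uaCnt abbs k : Int) := by
    intro k hk
    rw [hv1 k, hv0 k, if_pos hk]; ring
  rw [Bool.eq_iff_iff]
  constructor
  · intro h
    by_contra hall
    rw [List.all_eq_true] at hall
    push Not at hall
    obtain ⟨k, hk, hkv⟩ := hall
    rw [← hkeys0] at hk
    have : d1.keys.any (fun k => decide (d1.getD k 0 > 1)) = true := by
      rw [List.any_eq_true]
      refine ⟨k, by rw [hk1]; exact hk, ?_⟩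
      rw [hval k hk]
      simp at hkv ⊢
      omega
    simp [this] at h
  · intro h
    rw [List.all_eq_true] at h
    have : d1.keys.any (fun k => decide (d1.getD k 0 > 1)) = false := by
      rw [List.any_eq_false]
      intro k hk
      rw [hk1, hkeys0] at hk
      have := h k hk
      rw [hval k (by rw [← hkeys0] at hk; exact hk)]
      simp at this ⊢
      omega
    rw [this]
    rfl

-- B side: the counting dict is the counter
lemma ua_cnt_eq (abbs : List String) :
    abbs.foldl (fun d ab => d.insert ab (d.getD ab 0 + 1)) PySem.Dict.empty
      = PySem.Dict.counter abbs :=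
  PySem.Dict.foldl_insert_getD_add_one_eq_counter abbs

-- early-exit scan = comparison of the full sum
lemma ua_loop_eq (cnt : PySem.Dict String Int) (w : List Char)
    (hnn : ∀ i, 0 ≤ cnt.getD (String.ofList (w.take i)) 0) :
    ∀ (is_ : List Nat) (hits : Int), hits ≤ 1 →
      uaWordLoop cnt w is_ hits
        = decide (hits + (is_.map (fun i => cnt.getD (String.ofList (w.take i)) 0)).sum ≤ 1) := by
  intro is_
  induction is_ with
  | nil => intro hits h; simp [uaWordLoop, h]
  | cons i rest ih =>
      intro hits h
      have hsum : 0 ≤ (rest.map (fun i => cnt.getD (String.ofList (w.take i)) 0)).sum := by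
        apply List.sum_nonneg; intro x hx
        obtain ⟨j, _, rfl⟩ := List.mem_map.mp hx
        exact hnn j
      simp only [uaWordLoop, List.map_cons, List.sum_cons]
      by_cases hgt : hits + cnt.getD (String.ofList (w.take i)) 0 > 1
      · rw [if_pos hgt]
        have hne : ¬ (hits + (cnt.getD (String.ofList (w.take i)) 0
            + (rest.map (fun i => cnt.getD (String.ofList (w.take i)) 0)).sum) ≤ 1) := by omega
        simp [hne]
      · rw [if_neg hgt, ih _ (by omega)]
        congr 1
        rw [eq_iff_iff]
        constructor <;> intro <;> omega

-- the indicator sum over all prefixes of w picks a out exactly once iff a prefixes w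
lemma ua_indicator (a : String) (w : List Char) :
    ((List.range (w.length + 1)).map
        (fun i => if a == String.ofList (w.take i) then (1 : Int) else 0)).sum
      = if a.toList <+: w then 1 else 0 := by
  rw [PySem.List.sum_map_ite_one_zero]
  have hbeq : ∀ i, (a == String.ofList (w.take i)) = true ↔ a.toList = w.take i := by
    intro i
    rw [beq_iff_eq]
    constructor
    · intro h; rw [h, String.toList_ofList]
    · intro h; rw [← h, String.ofList_toList]
  by_cases hp : a.toList <+: w
  · rw [if_pos hp]
    have hla : a.toList.length ≤ w.length := hp.length_le
    have hiff : (List.range (w.length + 1)).countP (fun i => a == String.ofList (w.take i))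
        = (List.range (w.length + 1)).countP (fun i => i == a.toList.length) := by
      apply List.countP_congr
      intro i hi
      have hi' : i ≤ w.length := by
        have := List.mem_range.mp hi; omega
      rw [hbeq i, beq_iff_eq]
      constructor
      · intro h
        have hlen := congrArg List.length h
        rw [List.length_take] at hlen
        omega
      · intro h; subst h
        exact (List.prefix_iff_eq_take.mp hp)
    rw [hiff, ← List.count, List.count_range, if_pos (Nat.lt_succ_of_le hla)]
    norm_num
  · rw [if_neg hp]
    have : (List.range (w.length + 1)).countP (fun i => a == String.ofList (w.take i)) = 0 := by
      rw [List.countP_eq_zero]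
      intro i _ hcon
      exact hp (by rw [(hbeq i).mp hcon]; exact List.take_prefix i w)
    simp [this]

-- the total over all prefixes is the prefix count
lemma ua_sum_counts (abbs : List String) (w : String) :
    ((List.range (w.toList.length + 1)).map
        (fun i => ((PySem.Dict.counter abbs).getD (String.ofList (w.toList.take i)) 0))).sum
      = (uaCnt abbs w : Int) := by
  induction abbs with
  | nil => simp [uaCnt, PySem.Dict.getD_counter]
  | cons a abbs ih =>
      have hsplit : ∀ i : Nat,
          ((PySem.Dict.counter (a :: abbs)).getD (String.ofList (w.toList.take i)) 0)
            = (if a == String.ofList (w.toList.take i) then (1 : Int) else 0)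
              + (PySem.Dict.counter abbs).getD (String.ofList (w.toList.take i)) 0 := by
        intro i
        rw [PySem.Dict.getD_counter, PySem.Dict.getD_counter, List.count_cons]
        split <;> push_cast <;> ring
      calc ((List.range (w.toList.length + 1)).map
          (fun i => ((PySem.Dict.counter (a :: abbs)).getD (String.ofList (w.toList.take i)) 0))).sum
          = ((List.range (w.toList.length + 1)).map
            (fun i => (if a == String.ofList (w.toList.take i) then (1 : Int) else 0)
              + (PySem.Dict.counter abbs).getD (String.ofList (w.toList.take i)) 0)).sum := by
            congr 1; exact List.map_congr_left (fun i _ => hsplit i)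
        _ = ((List.range (w.toList.length + 1)).map
              (fun i => if a == String.ofList (w.toList.take i) then (1 : Int) else 0)).sum
            + ((List.range (w.toList.length + 1)).map
              (fun i => (PySem.Dict.counter abbs).getD (String.ofList (w.toList.take i)) 0)).sum := by
            rw [PySem.List.sum_map_add_int]
        _ = (uaCnt (a :: abbs) w : Int) := by
            rw [ih, ua_indicator a w.toList]
            simp only [uaCnt, List.countP_cons]
            by_cases hpp : a.toList <+: w.toList
            · rw [if_pos hpp,
                  if_pos (show PySem.Str.startswith w a = true from by
                    rw [PySem.Str.startswith_eq]
                    exact (PySem.Chars.startswith_iff w.toList a.toList).mpr hpp)]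
              push_cast; ring
            · rw [if_neg hpp,
                  if_neg (show ¬ PySem.Str.startswith w a = true from fun hc => by
                    rw [PySem.Str.startswith_eq] at hc
                    exact hpp ((PySem.Chars.startswith_iff w.toList a.toList).mp hc))]
              push_cast; ring

lemma ua_B_eq (abbs words : List String) :
    unique_abbrev_alt abbs words = words.all (fun w => decide ((uaCnt abbs w : Int) ≤ 1)) := by
  unfold unique_abbrev_alt
  simp only [ua_cnt_eq]
  have hfun : ∀ w : String,
      uaWordLoop (PySem.Dict.counter abbs) w.toList (List.range (w.toList.length + 1)) 0
        = decide ((uaCnt abbs w : Int) ≤ 1) := by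
    intro w
    rw [ua_loop_eq (PySem.Dict.counter abbs) w.toList
          (fun i => by rw [PySem.Dict.getD_counter]; exact Int.natCast_nonneg _)
          (List.range (w.toList.length + 1)) 0 (by norm_num)]
    rw [ua_sum_counts]
    norm_num
  simp only [hfun]

-- ===== VERDICT (by name: the statement is the Claim_ definition above) =====
theorem unique_abbrev_spec : Claim_equal_unique_abbrev := by
  intro abbs words _
  unfold Spec_unique_abbrev
  rw [ua_A_eq, ua_B_eq]
  rw [Bool.eq_iff_iff, List.all_eq_true, List.all_eq_true]
  constructor
  · intro h w hw; exact h w ((PySem.List.mem_dedup words w).mpr hw)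
  · intro h w hw; exact h w ((PySem.List.mem_dedup words w).mp hw)
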